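-- pv_equiv track=rewrite | github.com/Arnaud1404/AdventOfCode2024 | Day4/day4.py | check_E
-- ===== SOURCE A (Python) =====
-- def check_E(rows) -> int:
--     result = 0
--     for row in rows:
--         index = 0
--         while index != -1:
--             index = row.find("XMAS", index)
--             if index != -1:
--                 result += 1
--                 index += 1
--     return result
-- ===== SOURCE B (Python) =====
-- def check_E(rows) -> int:
--     return sum(
--         1
--         for row in rows
--         for i in range(len(row) - 3)
--         if row[i:i+4] == "XMAS"
--     )
-- ===== Notes on version B (the rewrite author's own statement) =====
-- stated objective: simpler
-- what changed: Replaces the find-and-jump while loop with a single comprehension counting every window position i where row[i:i+4] == 'XMAS'; correct because 'XMAS' has no self-overlap, so A's find-from-index-plus-one scan also counts every occurrence position.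
import Mathlib
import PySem

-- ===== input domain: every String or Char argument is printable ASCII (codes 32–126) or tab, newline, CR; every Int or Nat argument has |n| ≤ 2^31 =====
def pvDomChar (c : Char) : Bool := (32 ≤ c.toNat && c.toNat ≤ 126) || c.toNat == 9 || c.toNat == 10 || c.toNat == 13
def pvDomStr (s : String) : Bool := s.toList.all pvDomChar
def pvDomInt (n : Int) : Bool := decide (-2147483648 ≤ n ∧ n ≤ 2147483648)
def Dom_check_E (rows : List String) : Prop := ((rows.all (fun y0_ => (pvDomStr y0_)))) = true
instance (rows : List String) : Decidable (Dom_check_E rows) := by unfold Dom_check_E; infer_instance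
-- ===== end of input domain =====

-- B replaces A's find-and-jump while loop with a sliding-window count of positions where row[i:i+4] == "XMAS"; objective: simpler.

def pvXmas : List Char := ['X', 'M', 'A', 'S']

-- ===== PORT A =====
-- the inner 'while index != -1' loop; the proof arguments only justify termination
def check_E_go (row : List Char) (k : Nat) (hk : k ≤ row.length) (result : Int) : Int :=
  if h : PySem.Chars.findFrom row pvXmas (k : Int) none = -1 then
    result
  else
    have hsp := PySem.Chars.findFrom_natCast_spec row pvXmas k hk h
    have hlt : (PySem.Chars.findFrom row pvXmas (k : Int) none).toNat < row.length := by
      have hle := hsp.2.1.length_le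
      rw [List.length_drop, show pvXmas.length = 4 from rfl] at hle
      omega
    check_E_go row ((PySem.Chars.findFrom row pvXmas (k : Int) none).toNat + 1) (by omega)
      (result + 1)
termination_by row.length - k
decreasing_by
  have hki : (k : Int) ≤ PySem.Chars.findFrom row pvXmas (k : Int) none := hsp.1
  omega

def check_E (rows : List String) : Int :=
  rows.foldl (fun result row => check_E_go row.toList 0 (Nat.zero_le _) result) 0

-- ===== PORT B =====
def check_E_alt (rows : List String) : Int :=
  (rows.map (fun row =>
    (((PySem.List.pyRange 0 ((row.toList.length : Int) - 3) 1).countP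
        (fun i => PySem.Chars.slice row.toList (some i) (some (i + 4)) == pvXmas) : Nat) : Int))).sum

-- ===== PRECONDITION & SPEC =====
def Spec_check_E (rows : List String) (out : Int) : Prop := out = check_E_alt rows
instance (rows : List String) (out : Int) : Decidable (Spec_check_E rows out) := by unfold Spec_check_E; infer_instance

-- ===== CLAIM (what is proved, stated in full; the proofs are below) =====
def Claim_equal_check_E : Prop := ∀ (rows : List String), Dom_check_E rows → Spec_check_E rows (check_E rows)

-- ===== LEMMAS AND PROOFS =====

-- number of occurrence positions j ∈ [k, s.length) of "XMAS" in s
def pvCnt (s : List Char) (k : Nat) : Nat :=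
  (List.range' k (s.length - k)).countP (fun j => decide (pvXmas <+: s.drop j))

theorem pvXmas_len : pvXmas.length = 4 := rfl

theorem pvCnt_eq_zero (s : List Char) (k : Nat)
    (h : ¬ pvXmas <:+: s.drop k) : pvCnt s k = 0 := by
  unfold pvCnt
  rw [List.countP_eq_zero]
  intro j hj
  rw [List.mem_range'_1] at hj
  simp only [decide_eq_true_eq]
  intro hpre
  apply h
  have hdd : (s.drop k).drop (j - k) = s.drop j := by
    rw [List.drop_drop]
    congr 1
    omega
  rw [← hdd] at hpre
  exact hpre.isInfix.trans (List.drop_suffix _ _).isInfix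

theorem pvCnt_step (s : List Char) (k i : Nat) (hki : k ≤ i) (hil : i < s.length)
    (hi : pvXmas <+: s.drop i) (hmin : ∀ j, k ≤ j → j < i → ¬ pvXmas <+: s.drop j) :
    pvCnt s k = pvCnt s (i + 1) + 1 := by
  unfold pvCnt
  have hsplit : List.range' k (s.length - k) =
      List.range' k (i - k) ++ List.range' i (s.length - i) := by
    rw [show s.length - k = (i - k) + (s.length - i) by omega, ← List.range'_append,
      show k + 1 * (i - k) = i by omega]
  rw [hsplit, List.countP_append]
  have h0 : (List.range' k (i - k)).countP (fun j => decide (pvXmas <+: s.drop j)) = 0 := by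
    rw [List.countP_eq_zero]
    intro j hj
    rw [List.mem_range'_1] at hj
    simp only [decide_eq_true_eq]
    exact hmin j hj.1 (by omega)
  have h1 : List.range' i (s.length - i) = i :: List.range' (i + 1) (s.length - (i + 1)) := by
    rw [show s.length - i = (s.length - (i + 1)) + 1 by omega, List.range'_succ]
  rw [h0, h1, List.countP_cons]
  simp [hi]

theorem check_E_go_eq (s : List Char) (n : Nat) : ∀ (k : Nat) (_hn : s.length - k ≤ n)
    (hk : k ≤ s.length) (result : Int),
    check_E_go s k hk result = result + pvCnt s k := by
  induction n with
  | zero =>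
    intro k hn hk result
    rw [check_E_go]
    have hne : ¬ pvXmas <:+: s.drop k := by
      intro hcon
      have hle := hcon.length_le
      rw [pvXmas_len, List.length_drop] at hle
      omega
    rw [dif_pos ((PySem.Chars.findFrom_natCast_eq_neg_one_iff s pvXmas k hk).mpr hne),
      pvCnt_eq_zero s k hne]
    simp
  | succ n ih =>
    intro k hn hk result
    rw [check_E_go]
    by_cases h : PySem.Chars.findFrom s pvXmas (k : Int) none = -1
    · rw [dif_pos h, pvCnt_eq_zero s k
        ((PySem.Chars.findFrom_natCast_eq_neg_one_iff s pvXmas k hk).mp h)]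
      simp
    · rw [dif_neg h]
      obtain ⟨h1, h2, h3⟩ := PySem.Chars.findFrom_natCast_spec s pvXmas k hk h
      have hil : (PySem.Chars.findFrom s pvXmas (k : Int) none).toNat < s.length := by
        have hle := h2.length_le
        rw [pvXmas_len, List.length_drop] at hle
        omega
      rw [ih _ (by omega) (by omega) (result + 1),
        pvCnt_step s k (PySem.Chars.findFrom s pvXmas (k : Int) none).toNat (by omega) hil h2 h3]
      push_cast
      ring

theorem pv_window_eq (s : List Char) (j : Nat) :
    (PySem.List.slice s (some ((j : Nat) : Int)) (some (((j : Nat) : Int) + 4)) == pvXmas)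
      = decide (pvXmas <+: s.drop j) := by
  rw [show ((j : Int) + 4) = ((j : Int) + ((4 : Nat) : Int)) by norm_num,
    PySem.List.slice_natCast_add]
  rw [Bool.eq_iff_iff]
  simp only [beq_iff_eq, decide_eq_true_eq]
  constructor
  · intro h
    rw [← h]
    exact List.take_prefix 4 _
  · intro h
    have := List.prefix_iff_eq_take.mp h
    rw [pvXmas_len] at this
    exact this.symm

theorem pvCnt_zero_prefix_fail (s : List Char) (j : Nat) (hj : s.length < j + 4) :
    ¬ pvXmas <+: s.drop j := by
  intro h
  have hle := h.length_le
  rw [pvXmas_len, List.length_drop] at hle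
  omega

theorem row_alt_eq (s : List Char) :
    (((PySem.List.pyRange 0 ((s.length : Int) - 3) 1).countP
        (fun i => PySem.Chars.slice s (some i) (some (i + 4)) == pvXmas) : Nat) : Int)
      = (pvCnt s 0 : Int) := by
  congr 1
  simp only [PySem.Chars.slice_eq_listSlice]
  by_cases hlen : 3 < s.length
  · rw [PySem.List.pyRange_one, List.countP_map]
    have hcong : ((List.range ((((s.length : Int)) - 3) - 0).toNat).countP
        ((fun i => PySem.List.slice s (some i) (some (i + 4)) == pvXmas) ∘ (fun k : Nat => (0 : Int) + k)))
        = (List.range (s.length - 3)).countP (fun j => decide (pvXmas <+: s.drop j)) := by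
      rw [show (((s.length : Int)) - 3 - 0).toNat = s.length - 3 by omega]
      apply List.countP_congr
      intro j _
      simp only [Function.comp_apply, zero_add, pv_window_eq s j]
    rw [hcong]
    unfold pvCnt
    rw [List.range_eq_range', Nat.sub_zero]
    have hsplit : List.range' 0 s.length =
        List.range' 0 (s.length - 3) ++ List.range' (s.length - 3) 3 := by
      conv_lhs => rw [show s.length = (s.length - 3) + 3 by omega]
      rw [← List.range'_append, show (0 : Nat) + 1 * (s.length - 3) = s.length - 3 by omega]
    rw [hsplit, List.countP_append]
    have h0 : (List.range' (s.length - 3) 3).countP (fun j => decide (pvXmas <+: s.drop j)) = 0 := by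
      rw [List.countP_eq_zero]
      intro j hj
      rw [List.mem_range'_1] at hj
      simp only [decide_eq_true_eq]
      exact pvCnt_zero_prefix_fail s j (by omega)
    omega
  · rw [PySem.List.pyRange_one_eq_nil (by omega)]
    unfold pvCnt
    rw [Nat.sub_zero]
    have h0 : (List.range' 0 s.length).countP (fun j => decide (pvXmas <+: s.drop j)) = 0 := by
      rw [List.countP_eq_zero]
      intro j hj
      simp only [decide_eq_true_eq]
      exact pvCnt_zero_prefix_fail s j (by omega)
    simp [h0]

theorem check_E_foldl (rows : List String) : ∀ (acc : Int),
    rows.foldl (fun result row => check_E_go row.toList 0 (Nat.zero_le _) result) acc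
      = acc + (rows.map (fun row => (pvCnt row.toList 0 : Int))).sum := by
  induction rows with
  | nil => intro acc; simp
  | cons hd tl ih =>
    intro acc
    rw [List.foldl_cons, ih, List.map_cons, List.sum_cons,
      check_E_go_eq hd.toList hd.toList.length 0 (by omega) (Nat.zero_le _) acc]
    ring

-- ===== VERDICT (by name: the statement is the Claim_ definition above) =====
theorem check_E_spec : Claim_equal_check_E := by
  intro rows _
  unfold Spec_check_E check_E check_E_alt
  rw [check_E_foldl rows 0, zero_add]
  congr 1
  apply List.map_congr_left
  intro row _
  exact (row_alt_eq row.toList).symm
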